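-- pv_equiv track=rewrite | github.com/toshima/codejam | 2021-q/c.py | solve
-- ===== SOURCE A (Python) =====
-- def solve(n, cost):
--     nums = list(range(1, n+1))
--     for i in range(n-2, -1, -1):
--         c = min(n-i, cost - i)
--         if c < 1:
--             return "IMPOSSIBLE"
--         nums[i:i+c] = nums[i:i+c][::-1]
--         cost -= c
--     if cost:
--         return "IMPOSSIBLE"
--     return " ".join(map(str, nums))
-- ===== SOURCE B (Python) =====
-- def _zig(p, n):
--     # values p+1..n laid out as: p+2, p+4, ... ascending, then the
--     # complementary-parity values descending.  This is the closed form of the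
--     # array left on the suffix [p, n) by whole-suffix reversals at n-2, ..., p.
--     return list(range(p + 2, n + 1, 2)) + list(range(p + 1, n + 1, 2))[::-1]
--
--
-- def solve(n, cost):
--     # Direct construction (no per-step simulation): decide feasibility by the
--     # closed-form bounds, count the leading whole-suffix reversals T by the
--     # quadratic threshold t*(t+3) <= 2*(cost-n), then emit the zig-zag pattern
--     # with at most one explicit partial reversal.
--     if n < 2:
--         return " ".join(map(str, range(1, n + 1))) if cost == 0 else "IMPOSSIBLE"
--     if cost < n - 1 or cost > n * (n + 1) // 2 - 1:
--         return "IMPOSSIBLE"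
--     M = 2 * (cost - n)
--     T = 0
--     while T <= n - 2 and T * (T + 3) <= M:
--         T += 1
--     r = cost - T * (T + 3) // 2
--     if T == n - 1:
--         return " ".join(map(str, _zig(0, n)))
--     j = n - 2 - T
--     whole = [j + 1] + _zig(j + 1, n)
--     c = r - j
--     nums = list(range(1, j + 1)) + whole[:c][::-1] + whole[c:]
--     return " ".join(map(str, nums))
-- ===== Notes on version B (the rewrite author's own statement) =====
-- stated objective: faster
-- what changed: B does not simulate A's greedy at all: it decides feasibility by the closed-form bounds n-1 <= cost <= n(n+1)/2-1, counts the leading whole-suffix reversals T by the quadratic threshold t*(t+3) <= 2*(cost-n), and emits the resulting zig-zag permutation directly from arithmetic ranges with a single explicit partial reversal, instead of A's per-index loop of slice reversals.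
import Mathlib
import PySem

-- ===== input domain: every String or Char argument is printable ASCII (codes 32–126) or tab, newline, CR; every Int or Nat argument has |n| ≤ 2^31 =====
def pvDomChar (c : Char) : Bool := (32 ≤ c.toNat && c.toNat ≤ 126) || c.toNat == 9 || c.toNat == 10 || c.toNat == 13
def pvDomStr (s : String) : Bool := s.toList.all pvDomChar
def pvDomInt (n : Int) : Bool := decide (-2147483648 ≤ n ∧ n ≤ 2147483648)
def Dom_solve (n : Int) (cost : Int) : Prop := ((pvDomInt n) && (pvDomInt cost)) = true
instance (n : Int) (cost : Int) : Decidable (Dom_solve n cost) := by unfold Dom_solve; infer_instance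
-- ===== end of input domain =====

-- B abandons A's per-index simulation: it decides feasibility by closed-form bounds, counts the
-- leading whole-suffix reversals by a quadratic threshold, and emits the zig-zag permutation
-- directly from arithmetic ranges with one explicit partial reversal (objective: faster).


-- ===== PORT A =====
-- the for-loop of A: state (nums, cost); 'return "IMPOSSIBLE"' inside the loop = none
def solveLoopA (n : Int) : List Int → List Int × Int → Option (List Int × Int)
  | [], st => some st
  | i :: rest, (nums, cost) =>
    let c := min (n - i) (cost - i)
    if c < 1 then none
    else
      -- nums[i:i+c] = nums[i:i+c][::-1]  (slice assignment; [::-1] ported as .reverse)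
      let nums' := PySem.List.slice nums none (some i)
        ++ (PySem.List.slice nums (some i) (some (i + c))).reverse
        ++ PySem.List.slice nums (some (i + c)) none
      solveLoopA n rest (nums', cost - c)

def solve (n : Int) (cost : Int) : String :=
  -- nums = list(range(1, n+1)), used once, written inline
  match solveLoopA n (PySem.List.pyRange (n - 2) (-1) (-1)) (PySem.List.pyRange 1 (n + 1) 1, cost) with
  | none => "IMPOSSIBLE"
  | some (nums', cost') =>
    if cost' ≠ 0 then "IMPOSSIBLE"
    else PySem.Str.join " " (nums'.map PySem.Int.toStr)

-- ===== PORT B =====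
-- _zig(p, n): values p+1..n as p+2, p+4, ... ascending then complementary parity descending
def zigB (p n : Int) : List Int :=
  PySem.List.pyRange (p + 2) (n + 1) 2 ++ (PySem.List.pyRange (p + 1) (n + 1) 2).reverse

-- the 'while T <= n-2 and T*(T+3) <= M: T += 1' loop; fuel (n-1).toNat bounds its n-1 iterations
def countT (n M : Int) : Nat → Int → Int
  | 0, t => t
  | f + 1, t => if t ≤ n - 2 ∧ t * (t + 3) ≤ M then countT n M f (t + 1) else t

def solve_alt (n : Int) (cost : Int) : String :=
  if n < 2 then
    if cost = 0 then PySem.Str.join " " ((PySem.List.pyRange 1 (n + 1) 1).map PySem.Int.toStr)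
    else "IMPOSSIBLE"
  else if cost < n - 1 ∨ PySem.Int.floordiv (n * (n + 1)) 2 - 1 < cost then "IMPOSSIBLE"
  else
    let M := 2 * (cost - n)
    let T := countT n M (n - 1).toNat 0
    let r := cost - PySem.Int.floordiv (T * (T + 3)) 2
    if T = n - 1 then PySem.Str.join " " ((zigB 0 n).map PySem.Int.toStr)
    else
      let j := n - 2 - T
      let whole := (j + 1) :: zigB (j + 1) n
      let c := r - j
      PySem.Str.join " "
        ((PySem.List.pyRange 1 (j + 1) 1
          ++ (PySem.List.slice whole none (some c)).reverse
          ++ PySem.List.slice whole (some c) none).map PySem.Int.toStr)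

-- ===== PRECONDITION & SPEC =====
def Spec_solve (n : Int) (cost : Int) (out : String) : Prop := out = solve_alt n cost
instance (n : Int) (cost : Int) (out : String) : Decidable (Spec_solve n cost out) := by unfold Spec_solve; infer_instance

-- ===== CLAIM (what is proved, stated in full; the proofs are below) =====
def Claim_equal_solve : Prop := ∀ (n : Int) (cost : Int), Dom_solve n cost → Spec_solve n cost (solve n cost)

-- ===== LEMMAS AND PROOFS =====

-- zig-zag pattern by its defining recursion: region left on [p, n) by whole-suffix reversals,
-- k = n-1-p; zigAux (k+1) = reverse of (previous region with p+1 prepended)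
def zigAux (n : Int) : Nat → List Int
  | 0 => [n]
  | k + 1 => (zigAux n k).reverse ++ [n - 1 - (k : Int)]

lemma zigAux_length (n : Int) : ∀ k : Nat, (zigAux n k).length = k + 1 := by
  intro k; induction k with
  | zero => rfl
  | succ m ih => simp [zigAux, ih]

lemma pyRange_two_nil (a b : Int) (h : b ≤ a) : PySem.List.pyRange a b 2 = [] := by
  rw [PySem.List.pyRange_of_pos a b (by norm_num)]
  rw [if_neg (by omega)]
  simp

lemma pyRange_two_cons (a b : Int) (h : a < b) :
    PySem.List.pyRange a b 2 = a :: PySem.List.pyRange (a + 2) b 2 := by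
  rw [PySem.List.pyRange_of_pos a b (by norm_num)]
  by_cases h2 : a + 2 < b
  · rw [PySem.List.pyRange_of_pos (a + 2) b (by norm_num), if_pos h, if_pos h2]
    have hc : ((b - a + 2 - 1) / 2).toNat = ((b - (a + 2) + 2 - 1) / 2).toNat + 1 := by omega
    rw [hc, List.range_succ_eq_map]
    simp only [List.map_cons, List.map_map]
    refine List.cons_eq_cons.mpr ⟨by push_cast; ring, ?_⟩
    apply List.map_congr_left
    intro k _
    simp only [Function.comp_apply, Nat.succ_eq_add_one]
    push_cast
    ring
  · rw [if_pos h]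
    rw [pyRange_two_nil (a + 2) b (by omega)]
    have hc : ((b - a + 2 - 1) / 2).toNat = 1 := by omega
    rw [hc]
    simp

lemma zigB_step (n q : Int) (h : q ≤ n) :
    zigB (q - 1) n = (zigB q n).reverse ++ [q] := by
  simp only [zigB]
  rw [show q - 1 + 2 = q + 1 by ring, show q - 1 + 1 = q by ring]
  rw [List.reverse_append, List.reverse_reverse]
  rw [pyRange_two_cons q (n + 1) (by omega)]
  simp

-- B's closed-form ranges equal the recursive zig-zag pattern
lemma zig_closed (n : Int) : ∀ k : Nat, (k : Int) ≤ n - 1 →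
    zigB (n - 1 - (k : Int)) n = zigAux n k := by
  intro k
  induction k with
  | zero =>
    intro _
    simp only [zigB, zigAux, Nat.cast_zero, sub_zero]
    rw [show n - 1 + 2 = n + 1 by ring, show n - 1 + 1 = n by ring]
    rw [pyRange_two_nil (n + 1) (n + 1) le_rfl]
    rw [pyRange_two_cons n (n + 1) (by omega), pyRange_two_nil (n + 2) (n + 1) (by omega)]
    simp
  | succ m ih =>
    intro h
    push_cast at h ⊢
    have ihm := ih (by omega)
    rw [show n - 1 - ((m : Int) + 1) = (n - 1 - (m : Int)) - 1 by ring,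
        zigB_step n (n - 1 - (m : Int)) (by omega), ihm]
    simp only [zigAux]

-- capA n i = Σ_{j=0}^{i} (n - j): the maximal total cost the steps i, i-1, …, 0 can consume
def capA (n : Int) : Nat → Int
  | 0 => n
  | i + 1 => capA n i + (n - (i + 1))

lemma capA_lb (n : Int) (hn : 2 ≤ n) : ∀ i : Nat, (i : Int) ≤ n - 2 →
    (i : Int) + 1 ≤ capA n i ∧ n ≤ capA n i := by
  intro i
  induction i with
  | zero =>
    intro _
    have h0 : capA n 0 = n := rfl
    rw [h0]
    omega
  | succ k ih =>
    intro h
    have hk := ih (by push_cast at h ⊢; omega)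
    simp only [capA]
    push_cast at h ⊢
    omega

lemma capA_two_mul (n : Int) : ∀ i : Nat, 2 * capA n i = ((i : Int) + 1) * (2 * n - i) := by
  intro i
  induction i with
  | zero => simp only [capA, Nat.cast_zero]; ring
  | succ k ih =>
    simp only [capA]
    push_cast
    push_cast at ih
    nlinarith [ih]

-- Python slice assignment on P ++ R with |P| = i: the three slices recombine around position i
lemma sliceAssign (P R : List Int) (i c : Int) (hP : (P.length : Int) = i) (hc : 0 ≤ c) :
    PySem.List.slice (P ++ R) none (some i)
      ++ (PySem.List.slice (P ++ R) (some i) (some (i + c))).reverse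
      ++ PySem.List.slice (P ++ R) (some (i + c)) none
    = P ++ (R.take c.toNat).reverse ++ R.drop c.toNat := by
  subst hP
  rw [PySem.List.slice_to (P ++ R) (b := (P.length : Int)) (by omega),
      PySem.List.slice_toNat (P ++ R) (a := (P.length : Int)) (b := (P.length : Int) + c)
        (by omega) (by omega),
      PySem.List.slice_from (P ++ R) (a := (P.length : Int) + c) (by omega)]
  have h1 : ((P.length : Int)).toNat = P.length := by omega
  have h2 : (((P.length : Int)) + c).toNat = P.length + c.toNat := by omega
  rw [h1, h2, List.take_left, List.drop_left]
  have h3 : P.length + c.toNat - P.length = c.toNat := by omega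
  rw [h3]
  rw [List.drop_length_add_append c.toNat]

lemma solveLoopA_cons (n i cost : Int) (rest : List Int) (nums : List Int)
    (h : ¬ (min (n - i) (cost - i) < 1)) :
    solveLoopA n (i :: rest) (nums, cost) = solveLoopA n rest
      (PySem.List.slice nums none (some i)
        ++ (PySem.List.slice nums (some i) (some (i + min (n - i) (cost - i)))).reverse
        ++ PySem.List.slice nums (some (i + min (n - i) (cost - i))) none,
       cost - min (n - i) (cost - i)) := by
  simp only [solveLoopA]
  rw [if_neg h]

-- a c=1 slice assignment is the identity
lemma noopAssign (nums : List Int) (i : Int) (hi : 0 ≤ i) :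
    PySem.List.slice nums none (some i)
      ++ (PySem.List.slice nums (some i) (some (i + 1))).reverse
      ++ PySem.List.slice nums (some (i + 1)) none = nums := by
  rw [PySem.List.slice_to nums (b := i) hi,
      PySem.List.slice_toNat nums (a := i) (b := i + 1) hi (by omega),
      PySem.List.slice_from nums (a := i + 1) (by omega)]
  have h1 : (i + 1).toNat = i.toNat + 1 := by omega
  rw [h1]
  have h2 : i.toNat + 1 - i.toNat = 1 := by omega
  rw [h2]
  have h3 : (List.take 1 (List.drop i.toNat nums)).reverse = List.take 1 (List.drop i.toNat nums) := by
    cases List.drop i.toNat nums <;> simp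
  rw [h3]
  have h4 : List.drop (i.toNat + 1) nums = List.drop 1 (List.drop i.toNat nums) := by
    rw [List.drop_drop]
  rw [h4, List.append_assoc, List.take_append_drop, List.take_append_drop]

-- once cost = current index + 1 every remaining step has c = 1 and changes nothing
lemma loopA_noop (n : Int) : ∀ m : Nat, (m : Int) ≤ n → ∀ nums : List Int,
    solveLoopA n (PySem.List.pyRange ((m : Int) - 1) (-1) (-1)) (nums, (m : Int))
      = some (nums, 0) := by
  intro m
  induction m with
  | zero =>
    intro _ nums
    simp only [Nat.cast_zero, zero_sub]
    rw [PySem.List.pyRange_neg_one_eq_nil (by omega)]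
    simp [solveLoopA]
  | succ k ih =>
    intro h nums
    push_cast at h ⊢
    rw [show (k : Int) + 1 - 1 = (k : Int) by ring]
    rw [PySem.List.pyRange_neg_one_cons (by omega : (-1 : Int) < (k : Int))]
    have hmin : min (n - (k : Int)) ((k : Int) + 1 - (k : Int)) = 1 := by omega
    rw [solveLoopA_cons _ _ _ _ _ (by omega)]
    rw [hmin, noopAssign nums (k : Int) (by omega)]
    rw [show (k : Int) + 1 - 1 = (k : Int) by ring]
    exact ih (by omega) nums

-- when cost ≤ i the very first step of A already fails
lemma loop_fail (n i cost : Int) (nums : List Int) (hi : 0 ≤ i) (hc : cost ≤ i) :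
    solveLoopA n (PySem.List.pyRange i (-1) (-1)) (nums, cost) = none := by
  rw [PySem.List.pyRange_neg_one_cons (by omega)]
  simp only [solveLoopA]
  have h : min (n - i) (cost - i) < 1 := by omega
  simp [h]

-- what A's loop leaves once the state is "identity prefix ++ zig-zag region"
def outF (n : Int) : Nat → Int → List Int
  | 0, r =>
    if n ≤ r then ((1 : Int) :: zigAux n (n - 2).toNat).reverse
    else ((((1 : Int) :: zigAux n (n - 2).toNat).take r.toNat).reverse
          ++ ((1 : Int) :: zigAux n (n - 2).toNat).drop r.toNat)
  | p + 1, r =>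
    if n ≤ r then outF n p (r - (n - ((p : Int) + 1)))
    else
      PySem.List.pyRange 1 ((p : Int) + 2) 1
        ++ (((((p : Int) + 2) :: zigAux n (n - 3 - (p : Int)).toNat).take (r - ((p : Int) + 1)).toNat).reverse
            ++ (((p : Int) + 2) :: zigAux n (n - 3 - (p : Int)).toNat).drop (r - ((p : Int) + 1)).toNat)

-- the characterisation of A's loop: starting at step i = p in the invariant state,
-- it returns outF with leftover max(r - capA, 0)
lemma loopA_run (n : Int) (hn : 2 ≤ n) : ∀ p : Nat, (p : Int) ≤ n - 2 → ∀ r, (p : Int) + 1 ≤ r →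
    solveLoopA n (PySem.List.pyRange (p : Int) (-1) (-1))
      (PySem.List.pyRange 1 ((p : Int) + 2) 1 ++ zigAux n (n - 2 - (p : Int)).toNat, r)
    = some (outF n p r, max (r - capA n p) 0) := by
  intro p
  induction p with
  | zero =>
    intro hp r hr
    simp only [Nat.cast_zero, zero_add, sub_zero] at *
    rw [PySem.List.pyRange_neg_one_cons (by omega : (-1 : Int) < 0),
        show (0 : Int) - 1 = -1 by ring, PySem.List.pyRange_neg_one_eq_nil le_rfl]
    rw [solveLoopA_cons _ _ _ _ _ (by omega)]
    have hnums : PySem.List.pyRange 1 2 1 ++ zigAux n (n - 2).toNat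
        = ([] : List Int) ++ ((1 : Int) :: zigAux n (n - 2).toNat) := by
      rw [show (2 : Int) = 1 + 1 by norm_num, PySem.List.pyRange_one_singleton]
      simp
    rw [hnums, sliceAssign ([] : List Int) ((1 : Int) :: zigAux n (n - 2).toNat) 0
      (min (n - 0) (r - 0)) (by simp) (by omega)]
    simp only [solveLoopA]
    have hRlen : ((1 : Int) :: zigAux n (n - 2).toNat).length = n.toNat := by
      simp [zigAux_length]; omega
    by_cases hfull : n ≤ r
    · have hm : min (n - 0) (r - 0) = n := by omega
      rw [hm]
      have ht : (((1 : Int) :: zigAux n (n - 2).toNat).take n.toNat)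
          = (1 : Int) :: zigAux n (n - 2).toNat := by
        apply List.take_of_length_le; omega
      have hd : (((1 : Int) :: zigAux n (n - 2).toNat).drop n.toNat) = [] := by
        apply List.drop_eq_nil_of_le; omega
      rw [ht, hd]
      simp only [outF]
      rw [if_pos hfull]
      have hcap : capA n 0 = n := rfl
      simp only [Option.some.injEq, Prod.mk.injEq]
      exact ⟨by simp, by rw [hcap]; omega⟩
    · have hm : min (n - 0) (r - 0) = r := by omega
      rw [hm]
      simp only [outF]
      rw [if_neg hfull]
      have hcap : capA n 0 = n := rfl
      simp only [Option.some.injEq, Prod.mk.injEq]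
      exact ⟨by simp, by rw [hcap]; omega⟩
  | succ p ih =>
    intro hp r hr
    push_cast at hp hr ⊢
    rw [PySem.List.pyRange_neg_one_cons (by omega : (-1 : Int) < (p : Int) + 1),
        show (p : Int) + 1 - 1 = (p : Int) by ring]
    rw [solveLoopA_cons _ _ _ _ _ (by omega)]
    have hnums : PySem.List.pyRange 1 ((p : Int) + 1 + 2) 1 ++ zigAux n (n - 2 - ((p : Int) + 1)).toNat
        = PySem.List.pyRange 1 ((p : Int) + 2) 1
          ++ (((p : Int) + 2) :: zigAux n (n - 3 - (p : Int)).toNat) := by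
      rw [show (p : Int) + 1 + 2 = ((p : Int) + 2) + 1 by ring,
          PySem.List.pyRange_one_succ_right (by omega : (1 : Int) ≤ (p : Int) + 2)]
      rw [show n - 2 - ((p : Int) + 1) = n - 3 - (p : Int) by ring]
      simp
    rw [hnums, sliceAssign (PySem.List.pyRange 1 ((p : Int) + 2) 1)
      (((p : Int) + 2) :: zigAux n (n - 3 - (p : Int)).toNat) ((p : Int) + 1)
      (min (n - ((p : Int) + 1)) (r - ((p : Int) + 1)))
      (by rw [PySem.List.length_pyRange_one]; omega) (by omega)]
    have hRlen : ((((p : Int) + 2) :: zigAux n (n - 3 - (p : Int)).toNat)).length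
        = (n - ((p : Int) + 1)).toNat := by
      simp [zigAux_length]; omega
    by_cases hfull : n ≤ r
    · have hm : min (n - ((p : Int) + 1)) (r - ((p : Int) + 1)) = n - ((p : Int) + 1) := by omega
      rw [hm]
      have ht : ((((p : Int) + 2) :: zigAux n (n - 3 - (p : Int)).toNat).take (n - ((p : Int) + 1)).toNat)
          = ((p : Int) + 2) :: zigAux n (n - 3 - (p : Int)).toNat := by
        apply List.take_of_length_le; omega
      have hd : ((((p : Int) + 2) :: zigAux n (n - 3 - (p : Int)).toNat).drop (n - ((p : Int) + 1)).toNat) = [] := by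
        apply List.drop_eq_nil_of_le; omega
      rw [ht, hd]
      have hrev : (((p : Int) + 2) :: zigAux n (n - 3 - (p : Int)).toNat).reverse
          = zigAux n (n - 2 - (p : Int)).toNat := by
        have hk : (n - 2 - (p : Int)).toNat = (n - 3 - (p : Int)).toNat + 1 := by omega
        rw [hk]
        simp only [zigAux]
        rw [show n - 1 - (((n - 3 - (p : Int)).toNat : Nat) : Int) = (p : Int) + 2 by omega]
        simp
      rw [List.append_nil, hrev]
      rw [ih (by omega) (r - (n - ((p : Int) + 1))) (by omega)]
      simp only [outF]
      rw [if_pos hfull]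
      have hcap : capA n (p + 1) = capA n p + (n - ((p : Int) + 1)) := by
        simp only [capA]
      simp only [Option.some.injEq, Prod.mk.injEq]
      exact ⟨trivial, by omega⟩
    · have hm : min (n - ((p : Int) + 1)) (r - ((p : Int) + 1)) = r - ((p : Int) + 1) := by omega
      rw [hm]
      rw [show r - (r - ((p : Int) + 1)) = (p : Int) + 1 by ring]
      have hnoop := loopA_noop n (p + 1) (by push_cast; omega)
        (PySem.List.pyRange 1 ((p : Int) + 2) 1
          ++ ((((p : Int) + 2) :: zigAux n (n - 3 - (p : Int)).toNat).take (r - ((p : Int) + 1)).toNat).reverse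
          ++ (((p : Int) + 2) :: zigAux n (n - 3 - (p : Int)).toNat).drop (r - ((p : Int) + 1)).toNat)
      push_cast at hnoop
      rw [show (p : Int) + 1 - 1 = (p : Int) by ring] at hnoop
      rw [hnoop]
      simp only [outF]
      rw [if_neg hfull]
      have hcapge := (capA_lb n hn (p + 1) (by push_cast; omega)).2
      simp only [Option.some.injEq, Prod.mk.injEq]
      constructor
      · rw [List.append_assoc]
      · omega

-- B's output list, with countT's value spelled out (proof-side restatement of B's else-branch)
def finalList (n cost : Int) : List Int :=
  let T := countT n (2 * (cost - n)) (n - 1).toNat 0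
  if T = n - 1 then zigAux n (n - 1).toNat
  else
    let j := n - 2 - T
    let r := cost - PySem.Int.floordiv (T * (T + 3)) 2
    let whole := (j + 1) :: zigAux n (n - 2 - j).toNat
    PySem.List.pyRange 1 (j + 1) 1 ++ (whole.take (r - j).toNat).reverse ++ whole.drop (r - j).toNat

lemma floordiv_two_mul (k : Int) : PySem.Int.floordiv (2 * k) 2 = k := by
  rw [PySem.Int.floordiv_eq_iff_of_pos (by norm_num)]
  omega

lemma even_t_t3 (t : Int) : ∃ k, t * (t + 3) = 2 * k := by
  rcases Int.even_or_odd t with ⟨m, hm⟩ | ⟨m, hm⟩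
  · exact ⟨m * (t + 3), by rw [hm]; ring⟩
  · exact ⟨t * (m + 2), by rw [hm]; ring⟩

-- countT's loop invariantly finds the first t failing the condition
lemma countT_aux (n M : Int) : ∀ f : Nat, ∀ t0 : Int, 0 ≤ t0 → t0 ≤ n - 1 →
    n - 1 - t0 ≤ (f : Int) →
    t0 ≤ countT n M f t0 ∧ countT n M f t0 ≤ n - 1
      ∧ (∀ t, t0 ≤ t → t < countT n M f t0 → t * (t + 3) ≤ M)
      ∧ (countT n M f t0 ≤ n - 2 → M < countT n M f t0 * (countT n M f t0 + 3)) := by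
  intro f
  induction f with
  | zero =>
    intro t0 h0 h1 hf
    have ht : t0 = n - 1 := by push_cast at hf; omega
    simp only [countT]
    exact ⟨le_rfl, by omega, fun t a b => by omega, fun hle => by omega⟩
  | succ f ih =>
    intro t0 h0 h1 hf
    simp only [countT]
    by_cases hc : t0 ≤ n - 2 ∧ t0 * (t0 + 3) ≤ M
    · rw [if_pos hc]
      obtain ⟨ha, hb, hcv, hd⟩ := ih (t0 + 1) (by omega) (by omega) (by push_cast at hf ⊢; omega)
      refine ⟨by omega, hb, ?_, hd⟩
      intro t ht1 ht2
      by_cases he : t = t0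
      · subst he; exact hc.2
      · exact hcv t (by omega) ht2
    · rw [if_neg hc]
      refine ⟨le_rfl, h1, fun t a b => by omega, ?_⟩
      intro hle
      rcases not_and_or.mp hc with hx | hx
      · omega
      · omega

lemma outF_eq (n cost : Int) (hn : 2 ≤ n) :
    ∀ p : Nat, ∀ t r : Int, t = n - 2 - (p : Int) → 0 ≤ t →
    t ≤ countT n (2 * (cost - n)) (n - 1).toNat 0 →
    2 * r = 2 * cost - t * (t + 3) →
    outF n p r = finalList n cost := by
  obtain ⟨hT0, hT1, hTlt, hTstop⟩ :=
    countT_aux n (2 * (cost - n)) (n - 1).toNat 0 le_rfl (by omega) (by omega)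
  set T := countT n (2 * (cost - n)) (n - 1).toNat 0 with hTdef
  intro p
  induction p with
  | zero =>
    intro t r ht h0t htT h2r
    simp only [Nat.cast_zero, sub_zero] at ht
    simp only [outF]
    by_cases hr : n ≤ r
    · rw [if_pos hr]
      have hcond : t * (t + 3) ≤ 2 * (cost - n) := by omega
      have hTn1 : T = n - 1 := by
        by_contra hne
        have hTle : T ≤ n - 2 := by omega
        have hst := hTstop hTle
        nlinarith [mul_nonneg (by omega : (0:Int) ≤ t - T) (by omega : (0:Int) ≤ t + T + 3)]
      simp only [finalList, ← hTdef]
      rw [if_pos hTn1]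
      have hk : (n - 1).toNat = (n - 2).toNat + 1 := by omega
      rw [hk]
      simp only [zigAux]
      rw [show n - 1 - (((n - 2).toNat : Nat) : Int) = 1 by omega]
      simp
    · rw [if_neg hr]
      have hfail : 2 * (cost - n) < t * (t + 3) := by omega
      have hTt : T = t := by
        rcases lt_or_eq_of_le htT with hlt | he
        · exact absurd (hTlt t h0t hlt) (by omega)
        · omega
      have hTne : T ≠ n - 1 := by omega
      simp only [finalList, ← hTdef]
      rw [if_neg hTne]
      have hprod : T * (T + 3) = 2 * (cost - r) := by rw [hTt]; omega
      rw [hprod, floordiv_two_mul]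
      rw [show n - 2 - T = 0 by omega]
      rw [show cost - (cost - r) - 0 = r by ring, show (0:Int) + 1 = 1 by ring,
          show n - 2 - (0:Int) = n - 2 by ring]
      rw [PySem.List.pyRange_one_eq_nil le_rfl]
      simp
  | succ p ih =>
    intro t r ht h0t htT h2r
    push_cast at ht
    simp only [outF]
    by_cases hr : n ≤ r
    · rw [if_pos hr]
      have hcond : t * (t + 3) ≤ 2 * (cost - n) := by omega
      have hlt : t < T := by
        by_contra hge
        have he : t = T := by omega
        have hst := hTstop (by omega : T ≤ n - 2)
        rw [← he] at hst
        omega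
      refine ih (t + 1) (r - (n - ((p : Int) + 1))) (by omega) (by omega) (by omega) ?_
      have hx : (t + 1) * ((t + 1) + 3) = t * (t + 3) + 2 * t + 4 := by ring
      omega
    · rw [if_neg hr]
      have hfail : 2 * (cost - n) < t * (t + 3) := by omega
      have hTt : T = t := by
        rcases lt_or_eq_of_le htT with hlt | he
        · exact absurd (hTlt t h0t hlt) (by omega)
        · omega
      have hTne : T ≠ n - 1 := by omega
      simp only [finalList, ← hTdef]
      rw [if_neg hTne]
      have hprod : T * (T + 3) = 2 * (cost - r) := by rw [hTt]; omega
      rw [hprod, floordiv_two_mul]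
      rw [show n - 2 - T = (p : Int) + 1 by omega]
      rw [show cost - (cost - r) - ((p : Int) + 1) = r - ((p : Int) + 1) by ring,
          show (p : Int) + 1 + 1 = (p : Int) + 2 by ring,
          show n - 2 - ((p : Int) + 1) = n - 3 - (p : Int) by ring]
      simp

-- in the feasible range B's let-chain is exactly finalList rendered as a string
lemma solve_alt_feasible (n cost : Int) (hn : 2 ≤ n) (hlow : n - 1 ≤ cost)
    (hhigh : cost ≤ PySem.Int.floordiv (n * (n + 1)) 2 - 1) :
    solve_alt n cost = PySem.Str.join " " ((finalList n cost).map PySem.Int.toStr) := by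
  obtain ⟨hT0, hT1, hTlt, hTstop⟩ :=
    countT_aux n (2 * (cost - n)) (n - 1).toNat 0 le_rfl (by omega) (by omega)
  set T := countT n (2 * (cost - n)) (n - 1).toNat 0 with hTdef
  unfold solve_alt
  rw [if_neg (by omega), if_neg (by omega)]
  simp only []
  rw [← hTdef]
  simp only [finalList, ← hTdef]
  by_cases hTn : T = n - 1
  · rw [if_pos hTn, if_pos hTn]
    have hz := zig_closed n (n - 1).toNat (by omega)
    rw [show n - 1 - (((n - 1).toNat : Nat) : Int) = 0 by omega] at hz
    rw [hz]
  · rw [if_neg hTn, if_neg hTn]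
    -- the single partial reversal: 1 ≤ c, so the slices are take/drop
    have hrge : n - 2 - T + 1 ≤ cost - PySem.Int.floordiv (T * (T + 3)) 2 := by
      obtain ⟨k, hk⟩ := even_t_t3 T
      rw [hk, floordiv_two_mul]
      by_cases hT0' : T = 0
      · have : k = 0 := by rw [hT0'] at hk; omega
        omega
      · have hco := hTlt (T - 1) (by omega) (by omega)
        have hr : (T - 1) * ((T - 1) + 3) = T * (T + 3) - 2 * T - 2 := by ring
        omega
    have hwhole : zigB (n - 2 - T + 1) n = zigAux n (n - 2 - (n - 2 - T)).toNat := by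
      have hz := zig_closed n T.toNat (by omega)
      rw [show n - 1 - ((T.toNat : Nat) : Int) = n - 2 - T + 1 by omega] at hz
      rw [show n - 2 - (n - 2 - T) = T by ring, hz]
    rw [hwhole]
    rw [PySem.List.slice_to _ (by omega : 0 ≤ cost - PySem.Int.floordiv (T * (T + 3)) 2 - (n - 2 - T)),
        PySem.List.slice_from _ (by omega : 0 ≤ cost - PySem.Int.floordiv (T * (T + 3)) 2 - (n - 2 - T))]

-- ===== VERDICT (by name: the statement is the Claim_ definition above) =====
theorem solve_spec : Claim_equal_solve := by
  intro n cost _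
  unfold Spec_solve solve
  by_cases hn : n < 2
  · rw [PySem.List.pyRange_neg_one_eq_nil (by omega)]
    simp only [solveLoopA]
    unfold solve_alt
    by_cases hc : cost = 0 <;> simp [hn, hc]
  · replace hn : 2 ≤ n := by omega
    have hicast : (((n - 2).toNat : Nat) : Int) = n - 2 := by omega
    have h2 := capA_two_mul n (n - 2).toNat
    rw [hicast] at h2
    have hfd : PySem.Int.floordiv (n * (n + 1)) 2 = capA n (n - 2).toNat + 1 := by
      rw [PySem.Int.floordiv_eq_iff_of_pos (by norm_num)]
      constructor <;> nlinarith [h2]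
    by_cases hlow : cost < n - 1
    · rw [loop_fail n (n - 2) cost _ (by omega) (by omega)]
      unfold solve_alt
      rw [if_neg (by omega), if_pos (Or.inl hlow)]
    · have hrun := loopA_run n hn (n - 2).toNat (by omega) cost (by omega)
      rw [hicast] at hrun
      rw [show n - 2 - (n - 2) = (0 : Int) by ring] at hrun
      rw [show ((0 : Int)).toNat = 0 from rfl] at hrun
      simp only [zigAux] at hrun
      rw [show n - 2 + 2 = n by ring] at hrun
      rw [← PySem.List.pyRange_one_succ_right (by omega : (1 : Int) ≤ n)] at hrun
      rw [hrun]
      show (if max (cost - capA n (n - 2).toNat) 0 ≠ 0 then "IMPOSSIBLE"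
        else PySem.Str.join " " (List.map PySem.Int.toStr (outF n (n - 2).toNat cost))) = solve_alt n cost
      by_cases hhigh : capA n (n - 2).toNat < cost
      · rw [if_pos (show max (cost - capA n (n - 2).toNat) 0 ≠ 0 by omega)]
        unfold solve_alt
        rw [if_neg (by omega), if_pos (Or.inr (by omega))]
      · rw [if_neg (show ¬ max (cost - capA n (n - 2).toNat) 0 ≠ 0 by omega)]
        rw [solve_alt_feasible n cost hn (by omega) (by omega)]
        have houtF : outF n (n - 2).toNat cost = finalList n cost :=
          outF_eq n cost hn (n - 2).toNat 0 cost (by omega) le_rfl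
            (countT_aux n (2 * (cost - n)) (n - 1).toNat 0 le_rfl (by omega) (by omega)).1
            (by ring)
        rw [houtF]
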